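-- pv_equiv track=rewrite | github.com/rohit051989/OpenAIAgents | KG/Batch_KG/cpm_analyzer_v1.py | _reachable_from_entries
-- ===== SOURCE A (Python) =====
-- from typing import Dict, List, Tuple, Set, Optional
-- from collections import defaultdict, deque
--
-- def _reachable_from_entries(entry_ids: List[str], succ) -> Set[str]:
--     seen = set()
--     dq = deque(entry_ids)
--     while dq:
--         n = dq.popleft()
--         if n in seen:
--             continue
--         seen.add(n)
--         for s in succ.get(n, []):
--             if s not in seen:
--                 dq.append(s)
--     return seen
-- ===== SOURCE B (Python) =====
-- def _reachable_from_entries(entry_ids, succ):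
--     # Level-synchronous BFS: expand whole frontier levels (unfiltered), filter at visit time.
--     seen = set()
--     frontier = list(entry_ids)
--     while frontier:
--         nxt = []
--         for n in frontier:
--             if n not in seen:
--                 seen.add(n)
--                 nxt.extend(succ.get(n, []))
--         frontier = nxt
--     return seen
-- ===== Notes on version B (the rewrite author's own statement) =====
-- stated objective: alternative
-- what changed: Replaces A's FIFO deque worklist that filters successors at enqueue time with a level-synchronous frontier BFS: each whole frontier is expanded unfiltered into the next level and nodes are filtered against seen at visit time, with no deque at all.
import Mathlib
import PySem

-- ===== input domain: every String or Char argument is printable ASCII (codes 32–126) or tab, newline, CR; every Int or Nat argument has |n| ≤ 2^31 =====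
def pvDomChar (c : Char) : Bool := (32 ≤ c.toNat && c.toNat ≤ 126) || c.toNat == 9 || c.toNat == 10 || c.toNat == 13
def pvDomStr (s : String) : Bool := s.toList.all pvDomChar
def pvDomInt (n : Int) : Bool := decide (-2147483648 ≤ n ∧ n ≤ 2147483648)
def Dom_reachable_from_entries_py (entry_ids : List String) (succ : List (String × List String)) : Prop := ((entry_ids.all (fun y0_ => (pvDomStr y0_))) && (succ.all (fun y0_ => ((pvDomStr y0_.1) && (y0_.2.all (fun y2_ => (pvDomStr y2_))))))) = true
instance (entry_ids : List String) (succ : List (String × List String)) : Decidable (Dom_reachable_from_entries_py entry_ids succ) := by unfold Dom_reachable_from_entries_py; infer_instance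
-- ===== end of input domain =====

-- B replaces A's FIFO deque worklist (enqueue-time filtering) by a level-synchronous frontier
-- BFS (visit-time filtering); objective: alternative decomposition, same reachable set in the
-- same insertion order. Python A returns a set and mutates nothing observable.

-- Termination helpers (cited by the ports' decreasing_by; the measure is the number of
-- dict keys not yet seen, lexicographically with the worklist length).
lemma pv_getD_mk_not_mem {succ : List (String × List String)} {n : String}
    (h : n ∉ succ.map Prod.fst) : (PySem.Dict.mk succ).getD n [] = [] := by
  induction succ with
  | nil => rfl
  | cons p rest ih =>
    simp only [List.map_cons, List.mem_cons] at h
    rw [PySem.Dict.getD_eq_get?_getD, PySem.Dict.get?_mk_cons]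
    have hne : (p.1 == n) = false := by
      simp only [beq_eq_false_iff_ne]; rintro rfl; exact h (Or.inl rfl)
    rw [hne, if_neg (by simp), ← PySem.Dict.getD_eq_get?_getD]
    exact ih (fun hm => h (Or.inr hm))

lemma pv_sdiff_snoc_subset (K : Finset String) (seen : List String) (n : String) :
    K \ (seen ++ [n]).toFinset ⊆ K \ seen.toFinset := by
  intro x hx
  simp only [Finset.mem_sdiff, List.toFinset_append, Finset.mem_union, List.mem_toFinset] at hx ⊢
  exact ⟨hx.1, fun hm => hx.2 (Or.inl (by simpa using hm))⟩

lemma pv_card_sdiff_snoc_le (K : Finset String) (seen : List String) (n : String) :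
    (K \ (seen ++ [n]).toFinset).card ≤ (K \ seen.toFinset).card :=
  Finset.card_le_card (pv_sdiff_snoc_subset K seen n)

lemma pv_card_sdiff_snoc_lt (K : Finset String) (seen : List String) (n : String)
    (hK : n ∈ K) (hs : n ∉ seen) :
    (K \ (seen ++ [n]).toFinset).card < (K \ seen.toFinset).card := by
  apply Finset.card_lt_card
  rw [Finset.ssubset_iff_of_subset (pv_sdiff_snoc_subset K seen n)]
  refine ⟨n, by simp [hK, hs], fun hmem => ?_⟩
  simp only [Finset.mem_sdiff, List.toFinset_append, Finset.mem_union, List.mem_toFinset] at hmem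
  exact hmem.2 (Or.inr (by simp))

lemma pv_sdiff_snoc_eq (K : Finset String) (seen : List String) (n : String) (hK : n ∉ K) :
    K \ (seen ++ [n]).toFinset = K \ seen.toFinset := by
  ext x
  simp only [Finset.mem_sdiff, List.toFinset_append, Finset.mem_union, List.mem_toFinset]
  constructor
  · rintro ⟨h1, h2⟩; exact ⟨h1, fun hm => h2 (Or.inl hm)⟩
  · rintro ⟨h1, h2⟩
    refine ⟨h1, fun hm => ?_⟩
    rcases hm with hm | hm
    · exact h2 hm
    · rw [List.mem_singleton] at hm
      exact hK (hm ▸ h1)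

-- ===== PORT A =====
-- A's while-loop: FIFO worklist, seen = Python set in insertion order,
-- successors filtered against seen at enqueue time (the inner 'if s not in seen').
def aloopA (succ : List (String × List String)) (seen dq : List String) : List String :=
  match dq with
  | [] => seen
  | n :: dq' =>
    if n ∈ seen then aloopA succ seen dq'
    else aloopA succ (seen ++ [n])
        (dq' ++ ((PySem.Dict.mk succ).getD n []).filter (fun s => s ∉ seen ++ [n]))
termination_by (((succ.map Prod.fst).toFinset \ seen.toFinset).card, dq.length)
decreasing_by
  · exact Prod.Lex.right _ (by simp)
  · rename_i hns
    by_cases hk : n ∈ succ.map Prod.fst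
    · exact Prod.Lex.left _ _ (pv_card_sdiff_snoc_lt _ _ _ (by simpa using hk) hns)
    · rw [pv_sdiff_snoc_eq _ _ _ (by simpa using hk)]
      apply Prod.Lex.right
      rw [pv_getD_mk_not_mem hk]
      simp

def reachable_from_entries_py (entry_ids : List String) (succ : List (String × List String)) : List String :=
  aloopA succ [] entry_ids

-- ===== PORT B =====
-- bstep is B's inner 'for n in frontier' loop: accumulators seen and nxt.
def bstep (succ : List (String × List String)) (seen nxt frontier : List String) :
    List String × List String :=
  match frontier with
  | [] => (seen, nxt)
  | n :: f =>
    if n ∈ seen then bstep succ seen nxt f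
    else bstep succ (seen ++ [n]) (nxt ++ (PySem.Dict.mk succ).getD n []) f

-- Termination of B's outer while-loop: one level either visits a new dict key
-- (the unseen-key count drops) or produces an empty next frontier.
lemma pv_bstep_card_le (succ : List (String × List String)) :
    ∀ (f seen nxt : List String),
      ((succ.map Prod.fst).toFinset \ (bstep succ seen nxt f).1.toFinset).card
        ≤ ((succ.map Prod.fst).toFinset \ seen.toFinset).card := by
  intro f
  induction f with
  | nil => intro seen nxt; simp [bstep]
  | cons n f ih =>
    intro seen nxt
    by_cases h : n ∈ seen
    · simp only [bstep, if_pos h]; exact ih seen nxt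
    · simp only [bstep, if_neg h]
      exact le_trans (ih _ _) (pv_card_sdiff_snoc_le _ seen n)

lemma pv_bstep_progress (succ : List (String × List String)) :
    ∀ (f seen nxt : List String),
      (((succ.map Prod.fst).toFinset \ (bstep succ seen nxt f).1.toFinset).card
         < ((succ.map Prod.fst).toFinset \ seen.toFinset).card)
      ∨ ((bstep succ seen nxt f).2 = nxt ∧
         ((succ.map Prod.fst).toFinset \ (bstep succ seen nxt f).1.toFinset).card
           = ((succ.map Prod.fst).toFinset \ seen.toFinset).card) := by
  intro f
  induction f with
  | nil => intro seen nxt; exact Or.inr ⟨rfl, rfl⟩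
  | cons n f ih =>
    intro seen nxt
    by_cases h : n ∈ seen
    · simp only [bstep, if_pos h]; exact ih seen nxt
    · simp only [bstep, if_neg h]
      by_cases hk : n ∈ succ.map Prod.fst
      · exact Or.inl (lt_of_le_of_lt (pv_bstep_card_le succ f _ _)
          (pv_card_sdiff_snoc_lt _ seen n (by simpa using hk) h))
      · rw [pv_getD_mk_not_mem hk, List.append_nil]
        have hEq := pv_sdiff_snoc_eq ((succ.map Prod.fst).toFinset) seen n (by simpa using hk)
        rcases ih (seen ++ [n]) nxt with hlt | ⟨h2, hcard⟩
        · exact Or.inl (by rw [← hEq]; exact hlt)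
        · exact Or.inr ⟨h2, by rw [hcard, hEq]⟩

-- B's outer while-loop: level-synchronous frontier BFS.
def bloop (succ : List (String × List String)) (seen frontier : List String) : List String :=
  if h : frontier = [] then seen
  else bloop succ (bstep succ seen [] frontier).1 (bstep succ seen [] frontier).2
termination_by (((succ.map Prod.fst).toFinset \ seen.toFinset).card, frontier.length)
decreasing_by
  rcases pv_bstep_progress succ frontier seen [] with hlt | ⟨h2, hcard⟩
  · exact Prod.Lex.left _ _ hlt
  · rw [hcard]
    apply Prod.Lex.right
    rw [h2]
    simpa [List.length_pos_iff] using h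

def reachable_from_entries_py_alt (entry_ids : List String) (succ : List (String × List String)) : List String :=
  bloop succ [] entry_ids

-- ===== PRECONDITION & SPEC =====
def Spec_reachable_from_entries_py (entry_ids : List String) (succ : List (String × List String)) (out : List String) : Prop := out = reachable_from_entries_py_alt entry_ids succ
instance (entry_ids : List String) (succ : List (String × List String)) (out : List String) : Decidable (Spec_reachable_from_entries_py entry_ids succ out) := by unfold Spec_reachable_from_entries_py; infer_instance

-- ===== CLAIM (what is proved, stated in full; the proofs are below) =====
def Claim_equal_reachable_from_entries_py : Prop := ∀ (entry_ids : List String) (succ : List (String × List String)), Dom_reachable_from_entries_py entry_ids succ → Spec_reachable_from_entries_py entry_ids succ (reachable_from_entries_py entry_ids succ)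

-- ===== LEMMAS AND PROOFS =====
-- Canonical bridge: the unfiltered FIFO worklist (already-seen nodes are skipped at
-- dequeue time anyway, so enqueue-time filtering does not change anything).
def uloop (succ : List (String × List String)) (seen dq : List String) : List String :=
  match dq with
  | [] => seen
  | n :: dq' =>
    if n ∈ seen then uloop succ seen dq'
    else uloop succ (seen ++ [n]) (dq' ++ (PySem.Dict.mk succ).getD n [])
termination_by (((succ.map Prod.fst).toFinset \ seen.toFinset).card, dq.length)
decreasing_by
  · exact Prod.Lex.right _ (by simp)
  · by_cases hk : n ∈ succ.map Prod.fst
    · exact Prod.Lex.left _ _ (pv_card_sdiff_snoc_lt _ _ _ (by simpa using hk) ‹n ∉ seen›)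
    · rw [pv_sdiff_snoc_eq _ _ _ (by simpa using hk)]
      apply Prod.Lex.right
      rw [pv_getD_mk_not_mem hk]
      simp

lemma uloop_nil (succ : List (String × List String)) (seen : List String) :
    uloop succ seen [] = seen := by rw [uloop]

lemma uloop_cons_mem (succ : List (String × List String)) {seen : List String} {n : String}
    (dq : List String) (h : n ∈ seen) : uloop succ seen (n :: dq) = uloop succ seen dq := by
  rw [uloop]; simp [h]

lemma uloop_cons_not_mem (succ : List (String × List String)) {seen : List String} {n : String}
    (dq : List String) (h : n ∉ seen) :
    uloop succ seen (n :: dq) = uloop succ (seen ++ [n]) (dq ++ (PySem.Dict.mk succ).getD n []) := by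
  rw [uloop]; simp [h]

-- a queue entry that is already seen can be deleted
lemma uloop_skip (succ : List (String × List String)) (x : String) :
    ∀ (pre : List String) (seen post : List String), x ∈ seen →
      uloop succ seen (pre ++ x :: post) = uloop succ seen (pre ++ post) := by
  intro pre
  induction pre with
  | nil => intro seen post hx; rw [List.nil_append, List.nil_append, uloop_cons_mem succ post hx]
  | cons m pre ih =>
    intro seen post hx
    by_cases hm : m ∈ seen
    · rw [List.cons_append, List.cons_append, uloop_cons_mem succ _ hm, uloop_cons_mem succ _ hm]
      exact ih seen post hx
    · rw [List.cons_append, List.cons_append, uloop_cons_not_mem succ _ hm,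
        uloop_cons_not_mem succ _ hm, List.append_assoc, List.append_assoc, List.cons_append]
      exact ih (seen ++ [m]) (post ++ (PySem.Dict.mk succ).getD m []) (by simp [hx])

-- hence filtering a to-be-enqueued list against the current seen set changes nothing
lemma uloop_filter (succ : List (String × List String)) (seen : List String) :
    ∀ (l pre : List String),
      uloop succ seen (pre ++ l.filter (fun s => s ∉ seen)) = uloop succ seen (pre ++ l) := by
  intro l
  induction l with
  | nil => intro pre; simp
  | cons x l ih =>
    intro pre
    by_cases hx : x ∈ seen
    · rw [List.filter_cons_of_neg (by simpa using hx), uloop_skip succ x pre seen l hx]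
      exact ih pre
    · rw [List.filter_cons_of_pos (by simpa using hx),
        show pre ++ x :: List.filter (fun s => decide (s ∉ seen)) l
            = (pre ++ [x]) ++ List.filter (fun s => decide (s ∉ seen)) l by simp,
        show pre ++ x :: l = (pre ++ [x]) ++ l by simp]
      exact ih (pre ++ [x])

lemma aloopA_eq_uloop (succ : List (String × List String)) (seen dq : List String) :
    aloopA succ seen dq = uloop succ seen dq := by
  fun_induction aloopA succ seen dq with
  | case1 seen => rw [uloop_nil]
  | case2 seen n dq' h ih => rw [uloop_cons_mem succ dq' h, ih]
  | case3 seen n dq' h ih =>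
    rw [uloop_cons_not_mem succ dq' h, ih, uloop_filter succ (seen ++ [n]) _ dq']

-- bstep with a non-empty nxt accumulator
lemma bstep_acc (succ : List (String × List String)) :
    ∀ (f seen nxt : List String),
      bstep succ seen nxt f = ((bstep succ seen [] f).1, nxt ++ (bstep succ seen [] f).2) := by
  intro f
  induction f with
  | nil => intro seen nxt; simp [bstep]
  | cons n f ih =>
    intro seen nxt
    by_cases h : n ∈ seen
    · simp only [bstep, if_pos h]; exact ih seen nxt
    · simp only [bstep, if_neg h]
      rw [ih (seen ++ [n]) (nxt ++ (PySem.Dict.mk succ).getD n []),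
        ih (seen ++ [n]) ([] ++ (PySem.Dict.mk succ).getD n [])]
      simp

-- processing one whole frontier level at the head of the unfiltered worklist
lemma uloop_level (succ : List (String × List String)) :
    ∀ (f seen tail : List String),
      uloop succ seen (f ++ tail)
        = uloop succ (bstep succ seen [] f).1 (tail ++ (bstep succ seen [] f).2) := by
  intro f
  induction f with
  | nil => intro seen tail; simp [bstep]
  | cons n f ih =>
    intro seen tail
    by_cases h : n ∈ seen
    · rw [List.cons_append, uloop_cons_mem succ _ h, ih seen tail]
      simp only [bstep, if_pos h]
    · rw [List.cons_append, uloop_cons_not_mem succ _ h, List.append_assoc,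
        ih (seen ++ [n]) (tail ++ (PySem.Dict.mk succ).getD n [])]
      simp only [bstep, if_neg h]
      rw [bstep_acc succ f (seen ++ [n]) ([] ++ (PySem.Dict.mk succ).getD n [])]
      simp

lemma uloop_eq_bloop (succ : List (String × List String)) (seen frontier : List String) :
    uloop succ seen frontier = bloop succ seen frontier := by
  fun_induction bloop succ seen frontier with
  | case1 seen => rw [uloop_nil]
  | case2 seen frontier h ih =>
    rw [← ih, ← List.append_nil frontier, uloop_level succ frontier seen []]
    simp

-- ===== VERDICT (by name: the statement is the Claim_ definition above) =====
theorem reachable_from_entries_py_spec : Claim_equal_reachable_from_entries_py := by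
  intro entry_ids succ _
  unfold Spec_reachable_from_entries_py reachable_from_entries_py reachable_from_entries_py_alt
  rw [aloopA_eq_uloop, uloop_eq_bloop]
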